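-- pv_equiv track=rewrite | github.com/halfbug/scrumiq | core/model_config.py | get_active_model
-- ===== SOURCE A (Python) =====
-- MODEL_CONFIG = {
--     "obsidianai": [
--         {"name": "gpt-4o-mini", "status": "active"},
--     ],
--     "azureai": [
--         {"name": "gemini-2.0-flash-lite-001", "status": "active"},
--     ],
--     "crimsonai": [
--         {"name": "deepseek-chat", "status": "active"},
--     ],
--     "gemini": [
--         {"name": "gemini-2.5-flash", "status": "active"},
--         {"name": "gemini-1.5-flash", "status": "inactive"},
--         {"name": "gemini-2.0-flash", "status": "inactive"},
--     ],
--     "gpt": [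
--         {"name": "gpt-4.1-mini", "status": "active"},
--     ],
--     # Add more providers and their models as needed
-- }
--
-- def get_active_model(model_or_provider: str) -> str:
--     """
--     Returns the active model name for the given provider.
--     If a specific model name is given, returns it directly.
--     If a provider name is given, returns the active model for that provider.
--     """
--     # If exact model name is present in any provider, return it
--     for models in MODEL_CONFIG.values():
--         for model in models:
--             if model["name"].lower() == model_or_provider.lower():
--                 return model["name"]
--     # Otherwise, treat as provider and return its active model
--     provider = model_or_provider.lower()
--     if provider in MODEL_CONFIG:
--         for model in MODEL_CONFIG[provider]:
--             if model.get("status") == "active":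
--                 return model["name"]
--     return model_or_provider  # fallback
-- ===== SOURCE B (Python) =====
-- MODEL_CONFIG = {
--     "obsidianai": [
--         {"name": "gpt-4o-mini", "status": "active"},
--     ],
--     "azureai": [
--         {"name": "gemini-2.0-flash-lite-001", "status": "active"},
--     ],
--     "crimsonai": [
--         {"name": "deepseek-chat", "status": "active"},
--     ],
--     "gemini": [
--         {"name": "gemini-2.5-flash", "status": "active"},
--         {"name": "gemini-1.5-flash", "status": "inactive"},
--         {"name": "gemini-2.0-flash", "status": "inactive"},
--     ],
--     "gpt": [
--         {"name": "gpt-4.1-mini", "status": "active"},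
--     ],
-- }
--
-- # Precomputed lookup tables: model name (lowercased) -> canonical name,
-- # and provider -> name of its first active model.
-- NAME_INDEX = {}
-- for _models in MODEL_CONFIG.values():
--     for _m in _models:
--         NAME_INDEX.setdefault(_m["name"].lower(), _m["name"])
--
-- ACTIVE_BY_PROVIDER = {}
-- for _provider, _models in MODEL_CONFIG.items():
--     for _m in _models:
--         if _m.get("status") == "active":
--             ACTIVE_BY_PROVIDER[_provider] = _m["name"]
--             break
--
-- def get_active_model(model_or_provider: str) -> str:
--     key = model_or_provider.lower()
--     if key in NAME_INDEX:
--         return NAME_INDEX[key]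
--     return ACTIVE_BY_PROVIDER.get(key, model_or_provider)
-- ===== Notes on version B (the rewrite author's own statement) =====
-- stated objective: idiomatic
-- what changed: Replaces the nested scans over MODEL_CONFIG on every call with two module-level precomputed dicts (lowercased name -> canonical name, provider -> first active model) and two constant-time lookups in get_active_model.
import Mathlib
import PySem

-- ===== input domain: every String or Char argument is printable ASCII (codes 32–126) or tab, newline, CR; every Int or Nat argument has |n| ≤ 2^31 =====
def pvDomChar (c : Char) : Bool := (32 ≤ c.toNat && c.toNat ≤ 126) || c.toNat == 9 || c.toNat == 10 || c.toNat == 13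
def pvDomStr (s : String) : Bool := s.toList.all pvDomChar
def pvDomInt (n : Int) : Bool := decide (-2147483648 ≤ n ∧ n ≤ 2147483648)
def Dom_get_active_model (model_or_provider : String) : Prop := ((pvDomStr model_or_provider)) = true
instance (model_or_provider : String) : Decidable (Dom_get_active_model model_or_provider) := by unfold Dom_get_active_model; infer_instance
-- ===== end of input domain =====

-- B precomputes two lookup tables from MODEL_CONFIG instead of A's per-call nested scans; idiomatic/constant-time per call.

-- ===== PORT A =====
-- MODEL_CONFIG: dict provider -> list of models; each model {"name": n, "status": st} as the pair (n, st).
def pvMC : PySem.Dict String (List (String × String)) := PySem.Dict.ofList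
  [("obsidianai", [("gpt-4o-mini", "active")]),
   ("azureai", [("gemini-2.0-flash-lite-001", "active")]),
   ("crimsonai", [("deepseek-chat", "active")]),
   ("gemini", [("gemini-2.5-flash", "active"), ("gemini-1.5-flash", "inactive"), ("gemini-2.0-flash", "inactive")]),
   ("gpt", [("gpt-4.1-mini", "active")])]

-- inner loop: 'for model in models: if model["name"].lower() == model_or_provider.lower(): return model["name"]'
def pvScanModels (s : String) : List (String × String) → Option String
  | [] => none
  | (name, _) :: rest =>
    if PySem.Str.lower name = PySem.Str.lower s then some name else pvScanModels s rest

-- outer loop over MODEL_CONFIG.values()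
def pvScanAll (s : String) : List (List (String × String)) → Option String
  | [] => none
  | ms :: rest =>
    match pvScanModels s ms with
    | some n => some n
    | none => pvScanAll s rest

-- 'for model in MODEL_CONFIG[provider]: if model.get("status") == "active": return model["name"]'
def pvFirstActive : List (String × String) → Option String
  | [] => none
  | (name, st) :: rest => if st = "active" then some name else pvFirstActive rest

def get_active_model (model_or_provider : String) : String :=
  match pvScanAll model_or_provider (PySem.Dict.values pvMC) with
  | some n => n
  | none =>
    let provider := PySem.Str.lower model_or_provider
    match PySem.Dict.get? pvMC provider with
    | some models =>
      match pvFirstActive models with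
      | some n => n
      | none => model_or_provider
    | none => model_or_provider

-- ===== PORT B =====
-- NAME_INDEX: built once from pvMC, first write wins (setdefault)
def pvNameIndex : PySem.Dict String String :=
  ((PySem.Dict.values pvMC).flatMap (fun ms => ms)).foldl
    (fun d m => PySem.Dict.setdefault d (PySem.Str.lower m.1) m.1) PySem.Dict.empty

-- ACTIVE_BY_PROVIDER: provider -> first active model name (skipped when none)
def pvActiveByProvider : PySem.Dict String String :=
  pvMC.items.foldl
    (fun d pm => match pvFirstActiveB pm.2 with
                 | some n => PySem.Dict.insert d pm.1 n
                 | none => d) PySem.Dict.empty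
where
  pvFirstActiveB : List (String × String) → Option String
    | [] => none
    | (name, st) :: rest => if st = "active" then some name else pvFirstActiveB rest

def get_active_model_alt (model_or_provider : String) : String :=
  let key := PySem.Str.lower model_or_provider
  match PySem.Dict.get? pvNameIndex key with
  | some n => n
  | none => (PySem.Dict.get? pvActiveByProvider key).getD model_or_provider

-- ===== PRECONDITION & SPEC =====
def Spec_get_active_model (model_or_provider : String) (out : String) : Prop := out = get_active_model_alt model_or_provider
instance (model_or_provider : String) (out : String) : Decidable (Spec_get_active_model model_or_provider out) := by unfold Spec_get_active_model; infer_instance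

-- ===== CLAIM (what is proved, stated in full; the proofs are below) =====
def Claim_equal_get_active_model : Prop := ∀ (model_or_provider : String), Dom_get_active_model model_or_provider → Spec_get_active_model model_or_provider (get_active_model model_or_provider)

-- ===== LEMMAS AND PROOFS =====
theorem pvNameIndex_eq : pvNameIndex = PySem.Dict.mk
    [("gpt-4o-mini", "gpt-4o-mini"), ("gemini-2.0-flash-lite-001", "gemini-2.0-flash-lite-001"),
     ("deepseek-chat", "deepseek-chat"), ("gemini-2.5-flash", "gemini-2.5-flash"),
     ("gemini-1.5-flash", "gemini-1.5-flash"), ("gemini-2.0-flash", "gemini-2.0-flash"),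
     ("gpt-4.1-mini", "gpt-4.1-mini")] := by decide

theorem pvActiveByProvider_eq : pvActiveByProvider = PySem.Dict.mk
    [("obsidianai", "gpt-4o-mini"), ("azureai", "gemini-2.0-flash-lite-001"),
     ("crimsonai", "deepseek-chat"), ("gemini", "gemini-2.5-flash"), ("gpt", "gpt-4.1-mini")] := by decide

-- lower is the identity on the (already-lowercase) literal names in pvMC
theorem pvLow1 : PySem.Str.lower "gpt-4o-mini" = "gpt-4o-mini" := by decide
theorem pvLow2 : PySem.Str.lower "gemini-2.0-flash-lite-001" = "gemini-2.0-flash-lite-001" := by decide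
theorem pvLow3 : PySem.Str.lower "deepseek-chat" = "deepseek-chat" := by decide
theorem pvLow4 : PySem.Str.lower "gemini-2.5-flash" = "gemini-2.5-flash" := by decide
theorem pvLow5 : PySem.Str.lower "gemini-1.5-flash" = "gemini-1.5-flash" := by decide
theorem pvLow6 : PySem.Str.lower "gemini-2.0-flash" = "gemini-2.0-flash" := by decide
theorem pvLow7 : PySem.Str.lower "gpt-4.1-mini" = "gpt-4.1-mini" := by decide

theorem pvMC_eq : pvMC = PySem.Dict.mk
    [("obsidianai", [("gpt-4o-mini", "active")]),
     ("azureai", [("gemini-2.0-flash-lite-001", "active")]),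
     ("crimsonai", [("deepseek-chat", "active")]),
     ("gemini", [("gemini-2.5-flash", "active"), ("gemini-1.5-flash", "inactive"), ("gemini-2.0-flash", "inactive")]),
     ("gpt", [("gpt-4.1-mini", "active")])] := by decide

theorem pvValues_eq : PySem.Dict.values pvMC =
    [[("gpt-4o-mini", "active")],
     [("gemini-2.0-flash-lite-001", "active")],
     [("deepseek-chat", "active")],
     [("gemini-2.5-flash", "active"), ("gemini-1.5-flash", "inactive"), ("gemini-2.0-flash", "inactive")],
     [("gpt-4.1-mini", "active")]] := by decide

-- ===== VERDICT (by name: the statement is the Claim_ definition above) =====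
set_option maxHeartbeats 1000000 in
theorem get_active_model_spec : Claim_equal_get_active_model := by
  intro s _
  unfold Spec_get_active_model get_active_model get_active_model_alt
  rw [pvNameIndex_eq, pvActiveByProvider_eq, pvValues_eq]
  simp only [pvScanAll, pvScanModels, pvLow1, pvLow2, pvLow3, pvLow4, pvLow5,
    pvLow6, pvLow7, PySem.Dict.get?_mk_cons, beq_iff_eq]
  generalize PySem.Str.lower s = t
  by_cases h1 : "gpt-4o-mini" = t
  · simp_all
  by_cases h2 : "gemini-2.0-flash-lite-001" = t
  · simp_all
  by_cases h3 : "deepseek-chat" = t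
  · simp_all
  by_cases h4 : "gemini-2.5-flash" = t
  · simp_all
  by_cases h5 : "gemini-1.5-flash" = t
  · simp_all
  by_cases h6 : "gemini-2.0-flash" = t
  · simp_all
  by_cases h7 : "gpt-4.1-mini" = t
  · simp_all
  by_cases h8 : "obsidianai" = t
  · simp_all [pvMC_eq, pvFirstActive, PySem.Dict.get?, List.find?, beq_eq_decide]
  by_cases h9 : "azureai" = t
  · simp_all [pvMC_eq, pvFirstActive, PySem.Dict.get?, List.find?, beq_eq_decide]
  by_cases h10 : "crimsonai" = t
  · simp_all [pvMC_eq, pvFirstActive, PySem.Dict.get?, List.find?, beq_eq_decide]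
  by_cases h11 : "gemini" = t
  · simp_all [pvMC_eq, pvFirstActive, PySem.Dict.get?, List.find?, beq_eq_decide]
  by_cases h12 : "gpt" = t
  · simp_all [pvMC_eq, pvFirstActive, PySem.Dict.get?, List.find?, beq_eq_decide]
  simp_all [pvMC_eq, PySem.Dict.get?, List.find?, beq_eq_decide]
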